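-- pv_equiv track=rewrite | github.com/gfosso/Confinement | ed/ising.py | lowestrepr
-- ===== SOURCE A (Python) =====
-- L=6
--
-- def readsite(conf,i): return (conf&(1<<i))>>i
--
-- def translate(conf):
-- 	zero=readsite(conf,0)
-- 	return (conf>>1)|(zero<<(L-1))
--
-- def lowestrepr(conf):
-- 	conf0=conf
-- 	conf1=conf
-- 	for i in range(L):
-- 		conf=translate(conf)
-- 		if conf1>conf: conf1=conf
-- 		elif conf0==conf: return conf1,i+1
-- 	return conf1,L
-- ===== SOURCE B (Python) =====
-- L = 6
--
-- def readsite(conf, i): return (conf & (1 << i)) >> i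
--
-- def translate(conf):
--     zero = readsite(conf, 0)
--     return (conf >> 1) | (zero << (L - 1))
--
-- def lowestrepr(conf):
--     # Precompute the whole translation orbit once, then derive both outputs
--     # from the list: the period is the first return index (or L), and the
--     # lowest representative is the min over the orbit prefix up to it.
--     seq = [conf]
--     for _ in range(L):
--         seq.append(translate(seq[-1]))
--     try:
--         k = seq.index(conf, 1)
--     except ValueError:
--         k = L
--     return (min(seq[:k + 1]), k)
-- ===== Notes on version B (the rewrite author's own statement) =====
-- stated objective: alternative
-- what changed: B precomputes the whole translation orbit as a list in one pass, then derives the period as the first-return index found by list search and the lowest representative as a min over the orbit prefix, replacing A's interleaved running-min update with early-exit cycle detection inside the loop.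
import Mathlib
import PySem

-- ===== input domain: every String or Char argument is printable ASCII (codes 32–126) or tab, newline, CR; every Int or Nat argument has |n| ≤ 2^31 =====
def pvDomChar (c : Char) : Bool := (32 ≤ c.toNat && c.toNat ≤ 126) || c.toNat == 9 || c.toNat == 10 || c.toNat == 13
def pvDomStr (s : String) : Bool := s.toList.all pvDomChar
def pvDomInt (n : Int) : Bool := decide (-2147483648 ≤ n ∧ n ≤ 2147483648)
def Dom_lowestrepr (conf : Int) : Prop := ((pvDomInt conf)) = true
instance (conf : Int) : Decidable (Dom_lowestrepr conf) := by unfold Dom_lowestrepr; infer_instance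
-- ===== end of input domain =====

-- B precomputes the whole translation orbit as a list once and derives both outputs
-- from it (first-return index + min over the orbit prefix) instead of A's interleaved
-- running-min loop with early exit; objective: alternative structure, same cost.

-- ===== PORT A =====
-- readsite(conf,i): only ever called with i = 0 here; exact for i ≥ 0
def readsiteA (conf i : Int) : Int := (PySem.Int.band conf (1 <<< i.toNat)) >>> i.toNat

def translateA (conf : Int) : Int :=
  let zero := readsiteA conf 0
  PySem.Int.bor (conf >>> 1) (zero <<< 5)

-- the 'for i in range(L)' body: fuel counts remaining iterations, i is the loop index
def lowestreprLoop (conf0 : Int) : Nat → Nat → Int → Int → Int × Int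
  | 0, _, _, conf1 => (conf1, 6)
  | fuel + 1, i, conf, conf1 =>
    let c := translateA conf
    if conf1 > c then lowestreprLoop conf0 fuel (i + 1) c c
    else if conf0 = c then (conf1, (i : Int) + 1)
    else lowestreprLoop conf0 fuel (i + 1) c conf1

def lowestrepr (conf : Int) : Int × Int := lowestreprLoop conf 6 0 conf conf

-- ===== PORT B =====
def readsiteB (conf i : Int) : Int := (PySem.Int.band conf (1 <<< i.toNat)) >>> i.toNat

def translateB (conf : Int) : Int :=
  let zero := readsiteB conf 0
  PySem.Int.bor (conf >>> 1) (zero <<< 5)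

-- seq = [conf] followed by L appends of translate(seq[-1])
def buildSeqB (c : Int) : Nat → List Int
  | 0 => [c]
  | n + 1 => c :: buildSeqB (translateB c) n

-- min(l) for a nonempty list (Python's min; the [] branch is a totality guard, never hit)
def pyMinB (l : List Int) : Int :=
  match l with
  | [] => 0
  | x :: xs => xs.foldl min x

def lowestrepr_alt (conf : Int) : Int × Int :=
  let seq := buildSeqB conf 6
  let k : Nat :=
    match PySem.List.index? (seq.drop 1) conf with
    | some j => j + 1
    | none => 6
  (pyMinB (seq.take (k + 1)), (k : Int))

-- ===== PRECONDITION & SPEC =====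
def Spec_lowestrepr (conf : Int) (out : Int × Int) : Prop := out = lowestrepr_alt conf
instance (conf : Int) (out : Int × Int) : Decidable (Spec_lowestrepr conf out) := by unfold Spec_lowestrepr; infer_instance

-- ===== CLAIM (what is proved, stated in full; the proofs are below) =====
def Claim_equal_lowestrepr : Prop := ∀ (conf : Int), Dom_lowestrepr conf → Spec_lowestrepr conf (lowestrepr conf)

-- ===== LEMMAS AND PROOFS =====

-- the translation orbit, its running prefix-min, and the first-return index
def sA (conf : Int) (n : Nat) : Int := translateA^[n] conf

def MA (conf : Int) : Nat → Int
  | 0 => conf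
  | k + 1 => min (MA conf k) (sA conf (k + 1))

def kAbs (conf : Int) : Nat → Nat → Nat
  | 0, i => i
  | f + 1, i => if sA conf (i + 1) = conf then i + 1 else kAbs conf f (i + 1)

theorem tBA : translateB = translateA := rfl

theorem sA_zero (conf : Int) : sA conf 0 = conf := rfl

theorem sA_succ (conf : Int) (n : Nat) : sA conf (n + 1) = translateA (sA conf n) :=
  Function.iterate_succ_apply' _ _ _

theorem MA_le (conf : Int) : ∀ k, MA conf k ≤ conf
  | 0 => le_refl _
  | k + 1 => le_trans (min_le_left _ _) (MA_le conf k)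

theorem loop_eq (conf : Int) :
    ∀ (fuel i : Nat), i + fuel = 6 →
      lowestreprLoop conf fuel i (sA conf i) (MA conf i) =
      (MA conf (kAbs conf fuel i), ((kAbs conf fuel i : Nat) : Int)) := by
  intro fuel
  induction fuel with
  | zero =>
      intro i hi
      have : i = 6 := by omega
      subst this
      simp [lowestreprLoop, kAbs]
  | succ f ih =>
      intro i hi
      simp only [lowestreprLoop, kAbs]
      rw [← sA_succ]
      by_cases h : sA conf (i + 1) = conf
      · have hng : ¬ MA conf i > sA conf (i + 1) := by
          rw [h]; exact not_lt.mpr (MA_le conf i)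
        rw [if_neg hng, if_pos h.symm, if_pos h]
        have hM : MA conf (i + 1) = MA conf i := by
          rw [show MA conf (i + 1) = min (MA conf i) (sA conf (i + 1)) from rfl, h]
          exact min_eq_left (MA_le conf i)
        rw [hM]
        push_cast
        rfl
      · rw [if_neg h]
        by_cases hgt : MA conf i > sA conf (i + 1)
        · have hM : MA conf (i + 1) = sA conf (i + 1) :=
            min_eq_right (le_of_lt hgt)
          have ih' := ih (i + 1) (by omega)
          rw [hM] at ih'
          rw [if_pos hgt]
          exact ih'
        · have hM : MA conf (i + 1) = MA conf i :=
            min_eq_left (not_lt.mp hgt)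
          have ih' := ih (i + 1) (by omega)
          rw [hM] at ih'
          rw [if_neg hgt, if_neg (fun he => h he.symm)]
          exact ih'

theorem A_eq (conf : Int) :
    lowestrepr conf = (MA conf (kAbs conf 6 0), ((kAbs conf 6 0 : Nat) : Int)) := by
  have := loop_eq conf 6 0 rfl
  rwa [sA_zero] at this

theorem kAbs60 (conf : Int) : kAbs conf 6 0 =
    (if sA conf 1 = conf then 1 else if sA conf 2 = conf then 2 else
     if sA conf 3 = conf then 3 else if sA conf 4 = conf then 4 else
     if sA conf 5 = conf then 5 else if sA conf 6 = conf then 6 else 6) := rfl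

theorem seq_eq (conf : Int) :
    buildSeqB conf 6 = [conf, sA conf 1, sA conf 2, sA conf 3, sA conf 4,
      sA conf 5, sA conf 6] := by
  have e0 : translateA conf = sA conf 1 := by rw [sA_succ, sA_zero]
  have e : ∀ n, translateA (sA conf n) = sA conf (n + 1) :=
    fun n => (sA_succ conf n).symm
  simp only [buildSeqB, tBA, e0, e]

theorem B_eq (conf : Int) :
    lowestrepr_alt conf = (MA conf (kAbs conf 6 0), ((kAbs conf 6 0 : Nat) : Int)) := by
  unfold lowestrepr_alt
  rw [seq_eq, kAbs60]
  by_cases h1 : sA conf 1 = conf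
  · simp [h1, MA, pyMinB, PySem.List.index?, List.idxOf?, List.findIdx?_cons]
  · by_cases h2 : sA conf 2 = conf
    · simp [h1, h2, MA, pyMinB, PySem.List.index?, List.idxOf?, List.findIdx?_cons]
    · by_cases h3 : sA conf 3 = conf
      · simp [h1, h2, h3, MA, pyMinB, PySem.List.index?, List.idxOf?, List.findIdx?_cons]
      · by_cases h4 : sA conf 4 = conf
        · simp [h1, h2, h3, h4, MA, pyMinB, PySem.List.index?, List.idxOf?, List.findIdx?_cons]
        · by_cases h5 : sA conf 5 = conf
          · simp [h1, h2, h3, h4, h5, MA, pyMinB, PySem.List.index?, List.idxOf?, List.findIdx?_cons]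
          · by_cases h6 : sA conf 6 = conf
            · simp [h1, h2, h3, h4, h5, h6, MA, pyMinB, PySem.List.index?, List.idxOf?, List.findIdx?_cons]
            · simp [h1, h2, h3, h4, h5, h6, MA, pyMinB, PySem.List.index?, List.idxOf?, List.findIdx?_cons]

theorem main_eq (conf : Int) : lowestrepr conf = lowestrepr_alt conf := by
  rw [A_eq, B_eq]

-- ===== VERDICT (by name: the statement is the Claim_ definition above) =====
theorem lowestrepr_spec : Claim_equal_lowestrepr := by
  intro conf _
  unfold Spec_lowestrepr
  exact main_eq conf
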